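-- pv_equiv track=rewrite | github.com/heijp06/AoC-2021 | day08/lib.py | part1
-- ===== SOURCE A (Python) =====
-- def part1(rows: list[str]) -> int:
--     total = 0
--     for row in rows:
--         _, output = row.split(" | ")
--         total += sum(
--             len(number) in (2, 3, 4, 7)
--             for number
--             in output.split(" ")
--         )
--     return total
-- ===== SOURCE B (Python) =====
-- def part1(rows: list[str]) -> int:
--     total = 0
--     for row in rows:
--         _, output = row.split(" | ")
--         run = 0
--         for ch in output:
--             if ch == " ":
--                 if run in (2, 3, 4, 7):
--                     total += 1
--                 run = 0
--             else:
--                 run += 1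
--         if run in (2, 3, 4, 7):
--             total += 1
--     return total
-- ===== Notes on version B (the rewrite author's own statement) =====
-- stated objective: alternative
-- what changed: Replaces splitting each output section into a word list and summing a per-word length membership test with a character-level run-length state machine that scans the output string once and never materializes the word list.
import Mathlib
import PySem

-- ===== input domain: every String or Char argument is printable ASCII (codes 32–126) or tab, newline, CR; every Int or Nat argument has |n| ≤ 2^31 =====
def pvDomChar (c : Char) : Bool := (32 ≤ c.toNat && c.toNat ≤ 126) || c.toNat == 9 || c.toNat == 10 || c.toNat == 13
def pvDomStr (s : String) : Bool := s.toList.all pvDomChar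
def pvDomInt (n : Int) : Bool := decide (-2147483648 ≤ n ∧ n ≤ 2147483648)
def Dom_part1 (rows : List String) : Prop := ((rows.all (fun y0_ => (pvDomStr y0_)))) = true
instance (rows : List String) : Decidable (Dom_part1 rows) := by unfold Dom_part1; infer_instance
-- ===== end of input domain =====

-- B replaces A's split-into-words-and-sum with a character-level run-length scan of the output section.
-- ===== PORT A =====
def part1 (rows : List String) : Int :=
  rows.foldl
    (fun total row =>
      total +
        ((((PySem.Str.split? ((((PySem.Str.split? row " | ").getD [])).getD 1 "") " ").getD [])).map
          (fun number =>
            if PySem.Str.len number = 2 ∨ PySem.Str.len number = 3 ∨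
               PySem.Str.len number = 4 ∨ PySem.Str.len number = 7 then (1 : Int) else 0)).sum)
    0

-- ===== PORT B =====
def part1_alt (rows : List String) : Int :=
  rows.foldl
    (fun total row =>
      let output := (((PySem.Str.split? row " | ").getD [])).getD 1 ""
      let p := output.toList.foldl
        (fun (p : Int × Int) ch =>
          if ch = ' ' then
            (p.1 + (if p.2 = 2 ∨ p.2 = 3 ∨ p.2 = 4 ∨ p.2 = 7 then (1 : Int) else 0), 0)
          else (p.1, p.2 + 1))
        (total, 0)
      p.1 + (if p.2 = 2 ∨ p.2 = 3 ∨ p.2 = 4 ∨ p.2 = 7 then (1 : Int) else 0))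
    0

-- ===== PRECONDITION & SPEC =====
-- Pre_ admits exactly the rows on which A returns: each row must contain " | " exactly once,
-- otherwise the unpacking `_, output = row.split(" | ")` raises ValueError in both A and B.
def Pre_part1 (rows : List String) : Prop :=
  ∀ row ∈ rows, PySem.Str.count row " | " = 1
instance (rows : List String) : Decidable (Pre_part1 rows) := by unfold Pre_part1; infer_instance
def pvWitness_part1 : List String := ["ab cd | efg hi"]
def Spec_part1 (rows : List String) (out : Int) : Prop := out = part1_alt rows
instance (rows : List String) (out : Int) : Decidable (Spec_part1 rows out) := by unfold Spec_part1; infer_instance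

-- ===== CLAIM =====
def Claim_equal_part1 : Prop := ∀ (rows : List String), Dom_part1 rows → Pre_part1 rows → Spec_part1 rows (part1 rows)

-- ===== LEMMAS AND PROOFS =====
lemma pv_go_eq (c : Char) (fuel : Nat) (l cur : List Char) (acc : List (List Char)) (h : l.length ≤ fuel) :
    PySem.Chars.splitOn.go [c] fuel l cur acc
      = acc.reverse ++ ((l.splitOnP (· == c)).modifyHead (cur.reverse ++ ·)) := by
  induction fuel generalizing l cur acc with
  | zero =>
    have hl : l = [] := List.eq_nil_of_length_eq_zero (Nat.le_zero.mp h)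
    subst hl
    simp [PySem.Chars.splitOn.go, List.splitOnP_nil]
  | succ f ih =>
    cases l with
    | nil => simp [PySem.Chars.splitOn.go, List.splitOnP_nil]
    | cons ch rest =>
      have hr : rest.length ≤ f := Nat.le_of_succ_le_succ h
      by_cases hc : ch = c
      · subst hc
        simp only [PySem.Chars.splitOn.go, List.isPrefixOf, BEq.rfl, Bool.true_and,
          if_pos, List.splitOnP_cons, List.length_singleton,
          List.drop_one, List.tail_cons]
        rw [ih rest [] _ hr]
        cases List.splitOnP (fun x => x == ch) rest <;> simp
      · have hbc : (ch == c) = false := beq_eq_false_iff_ne.mpr hc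
        have hcb : (c == ch) = false := beq_eq_false_iff_ne.mpr (Ne.symm hc)
        simp only [PySem.Chars.splitOn.go, List.isPrefixOf, hcb, Bool.false_and,
          Bool.false_eq_true, if_false, List.splitOnP_cons, hbc]
        rw [ih rest (ch :: cur) acc hr]
        obtain ⟨a, t, ht⟩ := List.exists_cons_of_ne_nil (List.splitOnP_ne_nil (fun x => x == c) rest)
        rw [ht]
        simp

lemma pv_splitOn_single (c : Char) (s : List Char) :
    PySem.Chars.splitOn s [c] = s.splitOnP (· == c) := by
  rw [PySem.Chars.splitOn, pv_go_eq c (s.length + 1) s [] [] (Nat.le_succ _)]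
  cases List.splitOnP (fun x => x == c) s <;> simp

def pvInd (n : Int) : Int := if n = 2 ∨ n = 3 ∨ n = 4 ∨ n = 7 then 1 else 0

lemma pv_scan_eq (s : List Char) (total run : Int) :
    (let p := s.foldl
        (fun (p : Int × Int) ch =>
          if ch = ' ' then (p.1 + pvInd p.2, 0) else (p.1, p.2 + 1))
        (total, run);
      p.1 + pvInd p.2)
      = total + pvInd (run + ((s.splitOnP (· == ' ')).headI).length)
          + (((s.splitOnP (· == ' ')).tail).map (fun w => pvInd w.length)).sum := by
  induction s generalizing total run with
  | nil => simp [List.splitOnP_nil]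
  | cons ch rest ih =>
    rw [List.foldl_cons, List.splitOnP_cons]
    by_cases hc : ch = ' '
    · subst hc
      simp only [BEq.rfl, if_pos, ih]
      obtain ⟨a, t, ht⟩ := List.exists_cons_of_ne_nil (List.splitOnP_ne_nil (fun x => x == ' ') rest)
      rw [ht]
      simp
      ring
    · have hbc : (ch == ' ') = false := beq_eq_false_iff_ne.mpr hc
      simp only [if_neg hc, hbc, Bool.false_eq_true, if_false, ih]
      obtain ⟨a, t, ht⟩ := List.exists_cons_of_ne_nil (List.splitOnP_ne_nil (fun x => x == ' ') rest)
      rw [ht]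
      simp
      have : run + 1 + (a.length : Int) = run + ((a.length : Int) + 1) := by ring
      rw [this]

lemma pv_row (total : Int) (output : String) :
    total +
      (((PySem.Str.split? output " ").getD []).map
        (fun number =>
          if PySem.Str.len number = 2 ∨ PySem.Str.len number = 3 ∨
             PySem.Str.len number = 4 ∨ PySem.Str.len number = 7 then (1 : Int) else 0)).sum
      = (let p := output.toList.foldl
            (fun (p : Int × Int) ch =>
              if ch = ' ' then (p.1 + pvInd p.2, 0) else (p.1, p.2 + 1))
            (total, 0);
          p.1 + pvInd p.2) := by
  rw [pv_scan_eq]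
  have h1 : PySem.Str.split? output " " =
      some ((output.toList.splitOnP (· == ' ')).map String.ofList) := by
    simp [PySem.Str.split?, PySem.Chars.split?, pv_splitOn_single]
  rw [h1]
  obtain ⟨a, t, ht⟩ := List.exists_cons_of_ne_nil (List.splitOnP_ne_nil (fun x => x == ' ') output.toList)
  rw [ht]
  simp [pvInd, PySem.Str.len]
  have hm : ∀ (u : List (List Char)), List.map
        ((fun number : String =>
            if (number.length : Int) = 2 ∨ (number.length : Int) = 3 ∨
               (number.length : Int) = 4 ∨ (number.length : Int) = 7 then (1 : Int) else 0) ∘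
          String.ofList) u
      = List.map (fun w : List Char =>
            if (w.length : Int) = 2 ∨ (w.length : Int) = 3 ∨
               (w.length : Int) = 4 ∨ (w.length : Int) = 7 then (1 : Int) else 0) u := by
    intro u
    apply List.map_congr_left
    intro w hw
    simp
  rw [hm]
  ring


lemma pv_foldl_ext (f g : Int → String → Int) (h : ∀ t r, f t r = g t r) :
    ∀ (l : List String) (t : Int), l.foldl f t = l.foldl g t := by
  intro l
  induction l with
  | nil => intro t; rfl
  | cons r rs ih => intro t; rw [List.foldl_cons, List.foldl_cons, h, ih]

-- ===== VERDICT =====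
theorem part1_spec : Claim_equal_part1 := by
  intro rows _ _
  unfold Spec_part1 part1 part1_alt
  apply pv_foldl_ext
  intro t r
  exact pv_row t ((((PySem.Str.split? r " | ").getD [])).getD 1 "")
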